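-- pv_equiv track=rewrite | github.com/dubingabie/Exercises | ex5/cartoonify.py | rotate_90_column
-- ===== SOURCE A (Python) =====
-- def rotate_90_column(image: list, direction: str, column: int) -> list:
--     rotated_image_column = list()
--     rotation_start = len(image) - 1 if direction == "R" else 0
--     rotation_end = -1 if direction == "R" else len(image)
--     rotation_index_change = -1 if direction == "R" else 1
--     for row in range(rotation_start, rotation_end, rotation_index_change):
--         rotated_image_column.append(image[row][column])
--     return rotated_image_column
-- ===== SOURCE B (Python) =====
-- def rotate_90_column(image: list, direction: str, column: int) -> list:
--     col = [row[column] for row in image]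
--     return col[::-1] if direction == "R" else col
-- ===== Notes on version B (the rewrite author's own statement) =====
-- stated objective: simpler
-- what changed: Replaces the direction-dependent loop bounds/step (start, end, index change computed per direction, then an index loop with append) by a uniform forward comprehension over the rows plus a single conditional slice reversal.
import Mathlib
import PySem

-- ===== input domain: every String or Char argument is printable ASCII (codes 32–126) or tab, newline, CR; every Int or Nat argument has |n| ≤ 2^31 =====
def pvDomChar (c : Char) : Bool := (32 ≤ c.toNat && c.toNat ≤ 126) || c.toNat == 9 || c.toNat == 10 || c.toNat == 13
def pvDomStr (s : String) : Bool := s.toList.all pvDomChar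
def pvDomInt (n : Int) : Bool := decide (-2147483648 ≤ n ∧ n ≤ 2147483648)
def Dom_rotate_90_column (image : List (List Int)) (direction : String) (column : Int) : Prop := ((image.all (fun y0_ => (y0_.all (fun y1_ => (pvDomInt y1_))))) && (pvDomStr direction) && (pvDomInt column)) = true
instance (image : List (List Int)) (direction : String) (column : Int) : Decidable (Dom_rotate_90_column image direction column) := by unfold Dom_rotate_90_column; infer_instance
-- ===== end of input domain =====

-- B builds the column with one uniform forward map and reverses it afterwards for "R",
-- replacing A's direction-dependent loop bounds/step and index loop (objective: simpler).

-- ===== PORT A =====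
def rotate_90_column (image : List (List Int)) (direction : String) (column : Int) : List Int :=
  -- rotated_image_column = list(); start/end/step depend on direction; index loop appending image[row][column]
  let rotation_start : Int := if direction == "R" then (image.length : Int) - 1 else 0
  let rotation_end : Int := if direction == "R" then -1 else (image.length : Int)
  let rotation_index_change : Int := if direction == "R" then -1 else 1
  (PySem.List.pyRange rotation_start rotation_end rotation_index_change).foldl
    (fun acc row => acc ++ [PySem.List.pyGetD (PySem.List.pyGetD image row []) column 0]) []
  -- image[row][column]: row index is in range by construction; column may be out of range (excluded by Pre_)

-- ===== PORT B =====
def rotate_90_column_alt (image : List (List Int)) (direction : String) (column : Int) : List Int :=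
  -- col = [row[column] for row in image]; return col[::-1] if direction == "R" else col
  let col := image.map (fun row => PySem.List.pyGetD row column 0)
  if direction == "R" then (PySem.List.slice? col none none (-1)).getD [] else col

-- ===== PRECONDITION & SPEC =====
-- Pre_ excludes exactly the inputs where row[column] raises IndexError in both Pythons:
-- some row of the image does not admit column as a (possibly negative) Python index.
def Pre_rotate_90_column (image : List (List Int)) (direction : String) (column : Int) : Prop :=
  ∀ row ∈ image, -(row.length : Int) ≤ column ∧ column < (row.length : Int)
instance (image : List (List Int)) (direction : String) (column : Int) : Decidable (Pre_rotate_90_column image direction column) := by unfold Pre_rotate_90_column; infer_instance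
def pvWitness_rotate_90_column : List (List Int) × String × Int := ([[1, 2], [3, 4]], "R", 0)

def Spec_rotate_90_column (image : List (List Int)) (direction : String) (column : Int) (out : List Int) : Prop := out = rotate_90_column_alt image direction column
instance (image : List (List Int)) (direction : String) (column : Int) (out : List Int) : Decidable (Spec_rotate_90_column image direction column out) := by unfold Spec_rotate_90_column; infer_instance

-- ===== CLAIM (what is proved, stated in full; the proofs are below) =====
def Claim_equal_rotate_90_column : Prop := ∀ (image : List (List Int)) (direction : String) (column : Int), Dom_rotate_90_column image direction column → Pre_rotate_90_column image direction column → Spec_rotate_90_column image direction column (rotate_90_column image direction column)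

-- ===== LEMMAS AND PROOFS =====

-- A's append-loop over any index list is the map over it, collected left to right.
theorem foldl_append_singleton {α β : Type} (g : α → β) :
    ∀ (l : List α) (init : List β),
      l.foldl (fun acc x => acc ++ [g x]) init = init ++ l.map g := by
  intro l
  induction l with
  | nil => intro init; simp
  | cons x xs ih => intro init; simp [List.foldl_cons, ih]

-- The forward index range maps to the rows themselves.
theorem map_rows (image : List (List Int)) (column : Int) :
    (PySem.List.pyRange 0 (image.length : Int) 1).map
        (fun row => PySem.List.pyGetD (PySem.List.pyGetD image row []) column 0)
      = image.map (fun row => PySem.List.pyGetD row column 0) := by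
  conv_rhs => rw [← PySem.List.map_pyGetD_pyRange_zero' image ([] : List Int)]
  rw [List.map_map]
  rfl

-- ===== VERDICT (by name: the statement is the Claim_ definition above) =====
theorem rotate_90_column_spec : Claim_equal_rotate_90_column := by
  intro image direction column _ _
  unfold Spec_rotate_90_column rotate_90_column rotate_90_column_alt
  by_cases hdir : direction == "R"
  · simp only [hdir, reduceIte]
    rw [PySem.List.slice?_none_none_neg_one]
    have hrange : PySem.List.pyRange ((image.length : Int) - 1) (-1) (-1)
        = (PySem.List.pyRange 0 (image.length : Int) 1).reverse := by
      rw [PySem.List.pyRange_neg_one_eq_reverse]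
      norm_num
    rw [hrange, foldl_append_singleton, List.map_reverse, map_rows]
    simp
  · simp only [hdir, Bool.false_eq_true, reduceIte]
    rw [foldl_append_singleton, List.nil_append, map_rows]

theorem pv_witness_ok :
    Dom_rotate_90_column pvWitness_rotate_90_column.1 pvWitness_rotate_90_column.2.1 pvWitness_rotate_90_column.2.2 ∧
    Pre_rotate_90_column pvWitness_rotate_90_column.1 pvWitness_rotate_90_column.2.1 pvWitness_rotate_90_column.2.2 := by
  constructor <;> decide
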